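-- pv_equiv track=rewrite | github.com/nikita-bedi/SCOPE-HN | scripts/find_image_mask_discrepancy.py | analyze_by_patient
-- ===== SOURCE A (Python) =====
-- def analyze_by_patient(images, masks):
--     """Analyze discrepancies by patient."""
--     patient_stats = {}
--
--     # Get all patient IDs
--     all_patients = set()
--     for key in images.keys():
--         patient_id = key.split('/')[0]
--         all_patients.add(patient_id)
--     for key in masks.keys():
--         patient_id = key.split('/')[0]
--         all_patients.add(patient_id)
--
--     for patient_id in sorted(all_patients):
--         patient_images = {k: v for k, v in images.items() if k.startswith(f"{patient_id}/")}
--         patient_masks = {k: v for k, v in masks.items() if k.startswith(f"{patient_id}/")}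
--
--         patient_stats[patient_id] = {
--             'images': len(patient_images),
--             'masks': len(patient_masks),
--             'difference': len(patient_images) - len(patient_masks)
--         }
--
--     return patient_stats
-- ===== SOURCE B (Python) =====
-- def analyze_by_patient(images, masks):
--     """Analyze discrepancies by patient (one pass grouping counts by patient-id prefix)."""
--     patients = set()
--     img_counts = {}
--     mask_counts = {}
--     for key in images:
--         pid, sep, _ = key.partition('/')
--         patients.add(pid)
--         if sep:
--             img_counts[pid] = img_counts.get(pid, 0) + 1
--     for key in masks:
--         pid, sep, _ = key.partition('/')
--         patients.add(pid)
--         if sep: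
--             mask_counts[pid] = mask_counts.get(pid, 0) + 1
--     return {
--         p: {'images': img_counts.get(p, 0),
--             'masks': mask_counts.get(p, 0),
--             'difference': img_counts.get(p, 0) - mask_counts.get(p, 0)}
--         for p in sorted(patients)
--     }
-- ===== Notes on version B (the rewrite author's own statement) =====
-- stated objective: faster
-- what changed: A rescans both whole dicts once per patient (dict comprehensions filtered by key prefix); B makes one pass over each dict, grouping counts per patient-id prefix into dictionaries, then emits the sorted per-patient rows from those counters.
import Mathlib
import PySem

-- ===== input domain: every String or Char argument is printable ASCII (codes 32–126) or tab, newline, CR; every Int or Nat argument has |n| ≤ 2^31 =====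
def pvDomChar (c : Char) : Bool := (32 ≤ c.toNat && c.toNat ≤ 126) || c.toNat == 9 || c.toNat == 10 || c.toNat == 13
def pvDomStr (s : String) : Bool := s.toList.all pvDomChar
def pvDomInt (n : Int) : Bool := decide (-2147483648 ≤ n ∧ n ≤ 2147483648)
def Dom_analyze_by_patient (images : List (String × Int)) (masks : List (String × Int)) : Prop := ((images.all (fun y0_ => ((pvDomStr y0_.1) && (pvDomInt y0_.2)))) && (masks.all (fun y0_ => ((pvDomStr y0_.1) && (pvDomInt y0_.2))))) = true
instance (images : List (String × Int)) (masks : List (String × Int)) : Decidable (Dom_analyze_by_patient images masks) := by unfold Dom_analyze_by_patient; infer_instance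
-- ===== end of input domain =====

-- B replaces A's per-patient rescans of both dicts by one grouping pass that counts
-- images and masks per patient-id prefix in dictionaries (objective: faster).

-- ===== PORT A =====
-- key.split('/')[0]: split('/') always returns a non-empty list, so [0] is its head
def pvHead (s : String) : String := String.ofList ((PySem.Chars.splitOn s.toList ['/']).headD [])

def analyze_by_patient (images : List (String × Int)) (masks : List (String × Int)) : List (String × List (String × Int)) :=
  let allPatients : PySem.Set String :=
    masks.foldl (fun s kv => PySem.Set.add s (pvHead kv.1))
      (images.foldl (fun s kv => PySem.Set.add s (pvHead kv.1)) PySem.Set.empty)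
  let stats : PySem.Dict String (List (String × Int)) :=
    (PySem.List.sorted allPatients (fun x => x) false).foldl
      (fun d p =>
        -- f"{patient_id}/" ported on List Char (Lean's String.append is kernel-opaque)
        let pimgs : PySem.Dict String Int :=
          PySem.Dict.ofList (images.filter (fun kv => PySem.Chars.startswith kv.1.toList (p.toList ++ ['/'])))
        let pmsks : PySem.Dict String Int :=
          PySem.Dict.ofList (masks.filter (fun kv => PySem.Chars.startswith kv.1.toList (p.toList ++ ['/'])))
        d.insert p [("images", (pimgs.size : Int)), ("masks", (pmsks.size : Int)),
                    ("difference", (pimgs.size : Int) - (pmsks.size : Int))])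
      PySem.Dict.empty
  stats.items

-- ===== PORT B =====
-- key.partition('/'): head = takeWhile (· ≠ '/'), separator found = contains '/' — exact for a 1-char separator
def pvPid (s : String) : String := String.ofList (s.toList.takeWhile (fun c => c != '/'))

-- one loop body: record the patient id, and count the key if it has a '/' segment
def pvStep (st : PySem.Set String × PySem.Dict String Int) (kv : String × Int) :
    PySem.Set String × PySem.Dict String Int :=
  (PySem.Set.add st.1 (pvPid kv.1),
   if kv.1.toList.contains '/' then st.2.insert (pvPid kv.1) (st.2.getD (pvPid kv.1) 0 + 1) else st.2)

def analyze_by_patient_alt (images : List (String × Int)) (masks : List (String × Int)) : List (String × List (String × Int)) :=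
  let s1 := images.foldl pvStep (PySem.Set.empty, PySem.Dict.empty)
  let s2 := masks.foldl pvStep (s1.1, PySem.Dict.empty)
  (PySem.List.sorted s2.1 (fun x => x) false).map
    (fun p => (p, [("images", s1.2.getD p 0), ("masks", s2.2.getD p 0),
                   ("difference", s1.2.getD p 0 - s2.2.getD p 0)]))

-- ===== PRECONDITION & SPEC =====
-- The Python arguments are dicts, so the association lists must carry unique keys
-- (a duplicate key cannot occur in a Python dict and its reading in a list is unspecified).
def Pre_analyze_by_patient (images : List (String × Int)) (masks : List (String × Int)) : Prop :=
  (images.map Prod.fst).Nodup ∧ (masks.map Prod.fst).Nodup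
instance (images : List (String × Int)) (masks : List (String × Int)) : Decidable (Pre_analyze_by_patient images masks) := by unfold Pre_analyze_by_patient; infer_instance

def pvWitness_analyze_by_patient : (List (String × Int)) × (List (String × Int)) :=
  ([("p1/a.png", 1), ("p1/b.png", 2), ("p2", 7)], [("p1/a.png", 3)])

def Spec_analyze_by_patient (images : List (String × Int)) (masks : List (String × Int)) (out : List (String × List (String × Int))) : Prop := out = analyze_by_patient_alt images masks
instance (images : List (String × Int)) (masks : List (String × Int)) (out : List (String × List (String × Int))) : Decidable (Spec_analyze_by_patient images masks out) := by unfold Spec_analyze_by_patient; infer_instance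

-- ===== CLAIM (what is proved, stated in full; the proofs are below) =====
def Claim_equal_analyze_by_patient : Prop := ∀ (images : List (String × Int)) (masks : List (String × Int)), Dom_analyze_by_patient images masks → Pre_analyze_by_patient images masks → Spec_analyze_by_patient images masks (analyze_by_patient images masks)

-- ===== LEMMAS AND PROOFS =====

theorem pv_go_head (fuel : Nat) : ∀ (l cur : List Char) (acc : List (List Char)), l.length < fuel →
    ∃ t, PySem.Chars.splitOn.go ['/'] fuel l cur acc
      = acc.reverse ++ (cur.reverse ++ l.takeWhile (fun c => c != '/')) :: t := by
  induction fuel with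
  | zero => intro l cur acc h; omega
  | succ f ih =>
    intro l cur acc h
    cases l with
    | nil =>
      exact ⟨[], by simp [PySem.Chars.splitOn.go]⟩
    | cons c rest =>
      by_cases hc : c = '/'
      · subst hc
        obtain ⟨t, ht⟩ := ih rest [] (cur.reverse :: acc) (by simpa using h)
        refine ⟨rest.takeWhile (fun c => c != '/') :: t, ?_⟩
        simp [PySem.Chars.splitOn.go, List.isPrefixOf, ht]
      · obtain ⟨t, ht⟩ := ih rest (c :: cur) acc (by simpa using Nat.lt_of_succ_lt_succ h)
        refine ⟨t, ?_⟩
        simp [PySem.Chars.splitOn.go, List.isPrefixOf, Ne.symm hc, ht, hc]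

theorem pvHead_eq_pvPid : pvHead = pvPid := by
  funext s
  obtain ⟨t, ht⟩ := pv_go_head (s.toList.length + 1) s.toList [] [] (by omega)
  unfold pvHead pvPid PySem.Chars.splitOn
  rw [ht]
  simp

theorem pv_no_slash (s : String) : '/' ∉ (pvPid s).toList := by
  unfold pvPid
  intro h
  simp at h
  have := List.mem_takeWhile_imp h
  simp at this

theorem pv_prefix_iff (ks pC : List Char) (hp : '/' ∉ pC) :
    (pC ++ ['/'] <+: ks) ↔ (ks.takeWhile (fun c => c != '/') = pC ∧ '/' ∈ ks) := by
  have hall : pC.takeWhile (fun c => c != '/') = pC :=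
    List.takeWhile_eq_self_iff.mpr (by
      intro x hx
      simp only [bne_iff_ne, ne_eq]
      intro h; subst h; exact hp hx)
  constructor
  · rintro ⟨t, rfl⟩
    constructor
    · rw [List.append_assoc, List.takeWhile_append, hall]
      simp
    · simp
  · rintro ⟨hq, hm⟩
    have hsplit := List.takeWhile_append_dropWhile (p := fun c => c != '/') (l := ks)
    set r := ks.dropWhile (fun c => c != '/') with hr
    have hrne : r ≠ [] := by
      intro h0
      rw [h0, List.append_nil] at hsplit
      rw [← hsplit] at hm
      rw [hq] at hm
      exact hp hm
    obtain ⟨a, r', hcons⟩ := List.exists_cons_of_ne_nil hrne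
    have hks : ks = pC ++ (a :: r') := by rw [← hsplit, hq, hcons]
    have htk : List.takeWhile (fun c => c != '/') (a :: r') = [] := by
      have h2 := hq
      rw [hks, List.takeWhile_append, hall] at h2
      have h3 : pC ++ List.takeWhile (fun c => c != '/') (a :: r') = pC ++ [] := by
        simpa using h2
      simpa using (List.append_cancel_left h3)
    have hhead : a = '/' := by
      by_contra hne
      rw [List.takeWhile_cons] at htk
      simp [hne] at htk
    exact ⟨r', by rw [hks, hhead]; simp⟩

theorem pv_startswith_eq (ks pC : List Char) (hp : '/' ∉ pC) :
    PySem.Chars.startswith ks (pC ++ ['/'])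
      = ((ks.takeWhile (fun c => c != '/')) == pC && ks.contains '/') := by
  rw [Bool.eq_iff_iff, PySem.Chars.startswith_iff]
  simp only [Bool.and_eq_true, beq_iff_eq, List.contains_eq_mem, decide_eq_true_eq]
  exact pv_prefix_iff ks pC hp

theorem pv_dict_size (l : List (String × Int)) (h : (l.map Prod.fst).Nodup) :
    (PySem.Dict.ofList l).size = l.length := by
  have hit := PySem.Dict.items_foldl_insert_fresh l Prod.fst Prod.snd PySem.Dict.empty
      (by intro a _; simp) h
  show (PySem.Dict.ofList l).items.length = l.length
  unfold PySem.Dict.ofList PySem.Dict.update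
  simp only [Prod.mk.eta] at hit
  rw [hit]
  simp [PySem.Dict.empty]

theorem pv_count (l : List (String × Int)) (p : String)
    (h : (l.map Prod.fst).Nodup) (hp : '/' ∉ p.toList) :
    ((PySem.Dict.ofList (l.filter (fun kv => PySem.Chars.startswith kv.1.toList (p.toList ++ ['/'])))).size : Int)
      = (l.foldl (fun d kv => if kv.1.toList.contains '/' then d.insert (pvPid kv.1) (d.getD (pvPid kv.1) 0 + 1) else d) PySem.Dict.empty).getD p 0 := by
  -- B side
  have hB := PySem.List.foldl_if_eq_foldl_filter
      (p := fun kv : String × Int => kv.1.toList.contains '/')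
      (f := fun (d : PySem.Dict String Int) (kv : String × Int) => d.insert (pvPid kv.1) (d.getD (pvPid kv.1) 0 + 1))
      l PySem.Dict.empty
  rw [hB]
  have hmap : ((l.filter (fun kv : String × Int => kv.1.toList.contains '/')).map (fun kv : String × Int => pvPid kv.1)).foldl
        (fun (d : PySem.Dict String Int) x => d.insert x (d.getD x 0 + 1)) PySem.Dict.empty
      = (l.filter (fun kv : String × Int => kv.1.toList.contains '/')).foldl
        (fun (d : PySem.Dict String Int) kv => d.insert (pvPid kv.1) (d.getD (pvPid kv.1) 0 + 1)) PySem.Dict.empty :=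
    List.foldl_map
  rw [← hmap, PySem.Dict.getD_foldl_insert_add_one]
  -- A side
  rw [pv_dict_size _ (List.Nodup.sublist (List.Sublist.map Prod.fst List.filter_sublist) h)]
  rw [← List.countP_eq_length_filter]
  rw [List.countP_congr (fun kv _ => by
        rw [pv_startswith_eq kv.1.toList p.toList hp])]
  rw [show (fun (kv : String × Int) => (kv.1.toList.takeWhile (fun c => c != '/') == p.toList && kv.1.toList.contains '/'))
      = (fun kv : String × Int => ((fun x => x == p) ∘ (fun kv : String × Int => pvPid kv.1)) kv && (fun kv : String × Int => kv.1.toList.contains '/') kv) from ?_]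
  · rw [← List.countP_filter, ← List.countP_map, ← List.count_eq_countP]
    simp
  · funext kv
    simp only [Function.comp]
    congr 1
    show (kv.1.toList.takeWhile (fun c => c != '/') == p.toList) = (pvPid kv.1 == p)
    unfold pvPid
    rw [Bool.eq_iff_iff]
    simp only [beq_iff_eq]
    constructor
    · intro hh; rw [hh]; simp
    · intro hh
      have := congrArg String.toList hh
      simpa using this

-- ===== VERDICT (by name: the statement is the Claim_ definition above) =====
theorem analyze_by_patient_spec : Claim_equal_analyze_by_patient := by
  intro images masks _hdom hpre
  obtain ⟨h1, h2⟩ := hpre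
  unfold Spec_analyze_by_patient analyze_by_patient analyze_by_patient_alt
  simp only [pvHead_eq_pvPid]
  have hs1 : images.foldl pvStep (PySem.Set.empty, PySem.Dict.empty)
      = (images.foldl (fun s kv => PySem.Set.add s (pvPid kv.1)) PySem.Set.empty,
         images.foldl (fun d kv => if kv.1.toList.contains '/' then d.insert (pvPid kv.1) (d.getD (pvPid kv.1) 0 + 1) else d) PySem.Dict.empty) :=
    PySem.List.foldl_prod_mk
      (fun s (kv : String × Int) => PySem.Set.add s (pvPid kv.1))
      (fun (d : PySem.Dict String Int) kv => if kv.1.toList.contains '/' then d.insert (pvPid kv.1) (d.getD (pvPid kv.1) 0 + 1) else d)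
      images PySem.Set.empty PySem.Dict.empty
  rw [hs1]
  have hs2 : masks.foldl pvStep
        (images.foldl (fun s kv => PySem.Set.add s (pvPid kv.1)) PySem.Set.empty, PySem.Dict.empty)
      = (masks.foldl (fun s kv => PySem.Set.add s (pvPid kv.1))
           (images.foldl (fun s kv => PySem.Set.add s (pvPid kv.1)) PySem.Set.empty),
         masks.foldl (fun d kv => if kv.1.toList.contains '/' then d.insert (pvPid kv.1) (d.getD (pvPid kv.1) 0 + 1) else d) PySem.Dict.empty) :=
    PySem.List.foldl_prod_mk
      (fun s (kv : String × Int) => PySem.Set.add s (pvPid kv.1))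
      (fun (d : PySem.Dict String Int) kv => if kv.1.toList.contains '/' then d.insert (pvPid kv.1) (d.getD (pvPid kv.1) 0 + 1) else d)
      masks _ PySem.Dict.empty
  rw [hs2]
  dsimp only
  have hnodup : (masks.foldl (fun s kv => PySem.Set.add s (pvPid kv.1))
      (images.foldl (fun s kv => PySem.Set.add s (pvPid kv.1)) PySem.Set.empty)).Nodup := by
    rw [← PySem.Set.update_map_eq_foldl_add, ← PySem.Set.update_map_eq_foldl_add]
    exact PySem.Set.nodup_update _ _ (PySem.Set.nodup_update _ _ List.nodup_nil)
  have hnd : (PySem.List.sorted (masks.foldl (fun s kv => PySem.Set.add s (pvPid kv.1))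
      (images.foldl (fun s kv => PySem.Set.add s (pvPid kv.1)) PySem.Set.empty)) (fun x => x) false).Nodup :=
    ((PySem.List.sorted_perm _ _ _).nodup_iff).mpr hnodup
  rw [PySem.Dict.items_foldl_insert_fresh _ (fun p => p) _ _
      (fun a _ => by simp) (by simpa [List.map_id] using hnd)]
  rw [show (PySem.Dict.empty : PySem.Dict String (List (String × Int))).items = [] from rfl, List.nil_append]
  apply List.map_congr_left
  intro p hp
  have hmem : p ∈ masks.foldl (fun s kv => PySem.Set.add s (pvPid kv.1))
      (images.foldl (fun s kv => PySem.Set.add s (pvPid kv.1)) PySem.Set.empty) :=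
    (PySem.List.mem_sorted _ _ _ p).mp hp
  have hp' : '/' ∉ p.toList := by
    rcases (PySem.Set.mem_foldl_add masks (fun kv => pvPid kv.1) _ p).mp hmem with hin | ⟨b, _, rfl⟩
    · rcases (PySem.Set.mem_foldl_add images (fun kv => pvPid kv.1) _ p).mp hin with hin2 | ⟨b, _, rfl⟩
      · simp [PySem.Set.empty] at hin2
      · exact pv_no_slash _
    · exact pv_no_slash _
  have e1 := pv_count images p h1 hp'
  have e2 := pv_count masks p h2 hp'
  rw [e1, e2]
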